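-- pv_equiv track=rewrite | github.com/FelixRodriguezJr/Discord-Bot | responses.py | owoizer
-- ===== SOURCE A (Python) =====
-- def owoizer(phrase):
--     translation: str = ""
--     for letter in phrase:
--         if letter.lower() in "o":
--             if letter.isupper():
--                 translation = translation + "Owo"
--             else:
--                 translation = translation + "owo"
--         elif letter.lower() in "u":
--             if letter.isupper():
--                 translation = translation + "Uwu"
--             else:
--                 translation = translation + "uwu"
--         elif letter.lower() in "w":
--             if letter.isupper():
--                 translation = translation + "Uwu"
--             else:
--                 translation = translation + "uwu"
--         elif letter.lower() in "r":
--             if letter.isupper():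
--                 translation = translation + "W"
--             else:
--                 translation = translation + "w"
--         else:
--             translation = translation + letter
--     return translation
-- ===== SOURCE B (Python) =====
-- # Staged global-replace algorithm: first rename each special letter to a unique
-- # sentinel control character (never present in printable-ASCII input), then
-- # expand each sentinel to its owo-speak replacement.  No per-character branch.
-- _STAGE1 = [('o', '\x00'), ('O', '\x01'), ('u', '\x02'), ('U', '\x03'),
--            ('w', '\x04'), ('W', '\x05'), ('r', '\x06'), ('R', '\x07')]
-- _STAGE2 = [('\x00', 'owo'), ('\x01', 'Owo'), ('\x02', 'uwu'), ('\x03', 'Uwu'),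
--            ('\x04', 'uwu'), ('\x05', 'Uwu'), ('\x06', 'w'), ('\x07', 'W')]
--
--
-- def owoizer(phrase):
--     for old, new in _STAGE1:
--         phrase = phrase.replace(old, new)
--     for old, new in _STAGE2:
--         phrase = phrase.replace(old, new)
--     return phrase
-- ===== Notes on version B (the rewrite author's own statement) =====
-- stated objective: faster
-- what changed: Replaces A's per-character if/elif/isupper loop with quadratic string concatenation by a staged whole-string rewriting: each special letter is first globally renamed to a unique sentinel control character (absent from printable-ASCII input), then each sentinel is globally expanded to its owo-speak replacement, via 16 str.replace passes.
import Mathlib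
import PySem

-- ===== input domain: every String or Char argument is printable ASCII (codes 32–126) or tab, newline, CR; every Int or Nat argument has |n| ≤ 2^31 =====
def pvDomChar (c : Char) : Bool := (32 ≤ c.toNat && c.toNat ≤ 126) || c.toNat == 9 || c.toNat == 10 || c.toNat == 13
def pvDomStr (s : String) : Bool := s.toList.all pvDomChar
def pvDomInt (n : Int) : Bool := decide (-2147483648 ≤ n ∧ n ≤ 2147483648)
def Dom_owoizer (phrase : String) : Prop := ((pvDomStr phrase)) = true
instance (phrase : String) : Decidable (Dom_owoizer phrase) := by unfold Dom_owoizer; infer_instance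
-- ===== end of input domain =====

-- B replaces A's per-character if/elif loop by staged whole-string replace passes
-- (special letters → unique sentinel control chars, then sentinels → replacements);
-- alternative algorithm, same result on the printable-ASCII domain.

-- ===== PORT A =====
-- one iteration of A's for-loop: the if/elif cascade appending to `translation`
def owoizerStep (translation : List Char) (letter : Char) : List Char :=
  if PySem.Chars.isIn (PySem.Chars.lower [letter]) "o".toList then
    if PySem.Chars.isupper letter then translation ++ "Owo".toList
    else translation ++ "owo".toList
  else if PySem.Chars.isIn (PySem.Chars.lower [letter]) "u".toList then
    if PySem.Chars.isupper letter then translation ++ "Uwu".toList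
    else translation ++ "uwu".toList
  else if PySem.Chars.isIn (PySem.Chars.lower [letter]) "w".toList then
    if PySem.Chars.isupper letter then translation ++ "Uwu".toList
    else translation ++ "uwu".toList
  else if PySem.Chars.isIn (PySem.Chars.lower [letter]) "r".toList then
    if PySem.Chars.isupper letter then translation ++ "W".toList
    else translation ++ "w".toList
  else translation ++ [letter]

def owoizer (phrase : String) : String :=
  String.ofList (phrase.toList.foldl owoizerStep [])

-- ===== PORT B =====
-- the module constants _STAGE1 and _STAGE2 of Source B (pairs old → new for str.replace)
def owoStage1 : List (Char × List Char) :=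
  [('o', ['\x00']), ('O', ['\x01']), ('u', ['\x02']), ('U', ['\x03']),
   ('w', ['\x04']), ('W', ['\x05']), ('r', ['\x06']), ('R', ['\x07'])]

def owoStage2 : List (Char × List Char) :=
  [('\x00', "owo".toList), ('\x01', "Owo".toList), ('\x02', "uwu".toList),
   ('\x03', "Uwu".toList), ('\x04', "uwu".toList), ('\x05', "Uwu".toList),
   ('\x06', "w".toList), ('\x07', "W".toList)]

-- the two for-loops of Source B: phrase = phrase.replace(old, new) over each stage
def owoizer_alt (phrase : String) : String :=
  let p1 := owoStage1.foldl (fun s p => PySem.Chars.replace s [p.1] p.2) phrase.toList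
  let p2 := owoStage2.foldl (fun s p => PySem.Chars.replace s [p.1] p.2) p1
  String.ofList p2

-- ===== PRECONDITION & SPEC =====
def Spec_owoizer (phrase : String) (out : String) : Prop := out = owoizer_alt phrase
instance (phrase : String) (out : String) : Decidable (Spec_owoizer phrase out) := by unfold Spec_owoizer; infer_instance

-- ===== CLAIM (what is proved, stated in full; the proofs are below) =====
def Claim_equal_owoizer : Prop := ∀ (phrase : String), Dom_owoizer phrase → Spec_owoizer phrase (owoizer phrase)

-- ===== LEMMAS AND PROOFS =====

-- replace with a single-char pattern is a flatMap over the characters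
theorem replace_go_single (c : Char) (new : List Char) :
    ∀ (l : List Char) (fuel : Nat) (acc : List Char), l.length ≤ fuel →
      PySem.Chars.replace.go [c] new fuel l acc
        = acc.reverse ++ l.flatMap (fun x => if x = c then new else [x]) := by
  intro l
  induction l with
  | nil => intro fuel acc _; cases fuel <;> simp [PySem.Chars.replace.go]
  | cons x t ih =>
    intro fuel acc hf
    cases fuel with
    | zero => simp at hf
    | succ n =>
      simp only [PySem.Chars.replace.go]
      by_cases hx : x = c
      · subst hx
        have hpre : List.isPrefixOf [x] (x :: t) = true := by
          simp [List.isPrefixOf]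
        rw [if_pos hpre]
        simp only [List.length_cons] at hf
        simp only [List.length_singleton, List.drop_succ_cons, List.drop_zero]
        rw [ih n (new.reverse ++ acc) (by omega)]
        simp
      · have hpre : List.isPrefixOf [c] (x :: t) = false := by
          simp [List.isPrefixOf]; exact fun h => (hx h.symm).elim
        rw [if_neg (by simp [hpre])]
        simp only [List.length_cons] at hf
        rw [ih n (x :: acc) (by omega)]
        simp [hx]

theorem replace_single (s : List Char) (c : Char) (new : List Char) :
    PySem.Chars.replace s [c] new = s.flatMap (fun x => if x = c then new else [x]) := by
  unfold PySem.Chars.replace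
  rw [if_neg (by simp)]
  simpa using replace_go_single c new s s.length [] le_rfl

-- a sequence of single-char replace passes acts characterwise
theorem foldl_replace_flatMap (stages : List (Char × List Char)) (s : List Char) :
    stages.foldl (fun t p => PySem.Chars.replace t [p.1] p.2) s
      = s.flatMap (fun c => stages.foldl (fun t p => PySem.Chars.replace t [p.1] p.2) [c]) := by
  induction stages generalizing s with
  | nil => simp
  | cons st rest ih =>
    simp only [List.foldl_cons]
    rw [ih (PySem.Chars.replace s [st.1] st.2), replace_single,
        List.flatMap_assoc]
    congr 1
    funext c
    rw [ih (PySem.Chars.replace [c] [st.1] st.2), replace_single]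
    simp

-- A's loop appends one piece per character
theorem step_append (acc : List Char) (c : Char) :
    owoizerStep acc c = acc ++ owoizerStep [] c := by
  unfold owoizerStep; split_ifs <;> simp

theorem foldl_step (xs : List Char) (acc : List Char) :
    xs.foldl owoizerStep acc = acc ++ xs.flatMap (fun c => owoizerStep [] c) := by
  induction xs generalizing acc with
  | nil => simp
  | cons x xs ih =>
    simp only [List.foldl_cons, List.flatMap_cons]
    rw [ih, step_append, List.append_assoc]

theorem char_eq_of_toNat {a b : Char} (h : a.toNat = b.toNat) : a = b := by
  apply Char.ext; exact UInt32.toNat_inj.mp h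

theorem char_le_toNat {a b : Char} (h : a ≤ b) : a.toNat ≤ b.toNat := by
  rw [Char.le_def] at h; exact h

-- 'x in "c"' for a one-char x is just equality
theorem isIn_single (c b : Char) : PySem.Chars.isIn [c] [b] = (c == b) := by
  rcases h : (c == b) with _ | _
  · simp at h
    rw [PySem.Chars.isIn_eq_false_iff]
    intro hinf
    have := hinf.sublist
    simp [List.sublist_singleton] at this
    exact h this
  · simp at h; subst h
    rw [PySem.Chars.isIn_iff_infix]

-- if c is neither t (lowercase letter) nor its uppercase T, then c.lower() ≠ t
theorem lowerChar_ne (c t T : Char) (hT : T.toNat + 32 = t.toNat) (h1 : c ≠ t) (h2 : c ≠ T) :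
    PySem.Chars.lowerChar c ≠ t := by
  unfold PySem.Chars.lowerChar
  split_ifs with hc
  · unfold PySem.Chars.isupper at hc
    simp only [Bool.and_eq_true, decide_eq_true_eq] at hc
    have hA := char_le_toNat hc.1
    have hZ := char_le_toNat hc.2
    have hAn : ('A' : Char).toNat = 65 := by decide
    have hZn : ('Z' : Char).toNat = 90 := by decide
    intro he
    have hv : (c.toNat + 32).isValidChar := by constructor; omega
    have hn := congrArg Char.toNat he
    rw [Char.toNat_ofNat, if_pos hv] at hn
    exact h2 (char_eq_of_toNat (by omega))
  · exact h1

-- a domain character is not a sentinel control char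
theorem dom_ne_sentinel (c : Char) (hd : pvDomChar c = true) (s : Char)
    (hs : s.toNat < 8) : c ≠ s := by
  intro he; subst he
  simp only [pvDomChar, Bool.or_eq_true, Bool.and_eq_true, decide_eq_true_eq,
    beq_iff_eq] at hd
  omega

-- per-character agreement on the domain
theorem piece_eq (c : Char) (hd : pvDomChar c = true) :
    owoizerStep [] c
      = owoStage2.foldl (fun t p => PySem.Chars.replace t [p.1] p.2)
          (owoStage1.foldl (fun t p => PySem.Chars.replace t [p.1] p.2) [c]) := by
  by_cases h1 : c = 'o'; · subst h1; decide
  by_cases h2 : c = 'O'; · subst h2; decide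
  by_cases h3 : c = 'u'; · subst h3; decide
  by_cases h4 : c = 'U'; · subst h4; decide
  by_cases h5 : c = 'w'; · subst h5; decide
  by_cases h6 : c = 'W'; · subst h6; decide
  by_cases h7 : c = 'r'; · subst h7; decide
  by_cases h8 : c = 'R'; · subst h8; decide
  have ho := lowerChar_ne c 'o' 'O' (by decide) h1 h2
  have hu := lowerChar_ne c 'u' 'U' (by decide) h3 h4
  have hw := lowerChar_ne c 'w' 'W' (by decide) h5 h6
  have hr := lowerChar_ne c 'r' 'R' (by decide) h7 h8
  have s0 := dom_ne_sentinel c hd '\x00' (by decide)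
  have s1 := dom_ne_sentinel c hd '\x01' (by decide)
  have s2 := dom_ne_sentinel c hd '\x02' (by decide)
  have s3 := dom_ne_sentinel c hd '\x03' (by decide)
  have s4 := dom_ne_sentinel c hd '\x04' (by decide)
  have s5 := dom_ne_sentinel c hd '\x05' (by decide)
  have s6 := dom_ne_sentinel c hd '\x06' (by decide)
  have s7 := dom_ne_sentinel c hd '\x07' (by decide)
  unfold owoizerStep owoStage1 owoStage2
  simp [PySem.Chars.lower, isIn_single, ho, hu, hw, hr, replace_single,
    h1, h2, h3, h4, h5, h6, h7, h8, s0, s1, s2, s3, s4, s5, s6, s7]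

theorem owoizer_spec : Claim_equal_owoizer := by
  intro phrase hdom
  unfold Spec_owoizer owoizer owoizer_alt
  dsimp only
  rw [foldl_step, List.nil_append,
      foldl_replace_flatMap owoStage1 phrase.toList,
      foldl_replace_flatMap owoStage2, List.flatMap_assoc]
  apply congrArg String.ofList
  refine List.flatMap_congr (fun c hc => ?_)  -- pointwise, using Dom on each character
  have hd : pvDomChar c = true := by
    unfold Dom_owoizer pvDomStr at hdom
    exact List.all_eq_true.mp hdom c hc
  rw [piece_eq c hd]
  rw [foldl_replace_flatMap owoStage2]
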